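-- pv_equiv track=rewrite | github.com/huytq000605/GrindLC | Bit Manipulation/Substring XOR Queries/solution.py | substringXorQueries
-- ===== SOURCE A (Python) =====
-- from typing import List
--
-- def substringXorQueries(s: str, queries: List[List[int]]) -> List[List[int]]:
--     have = dict()
--     n = len(s)
--     for i in range(n):
--         cur = 0
--         for j in range(i, min(i+31, n)):
--             cur *= 2
--             cur += int(s[j])
--             if cur not in have:
--                 have[cur] = [i, j]
--             if j == i and s[j] == "0":
--                 break
--     result = []
--     for a, b in queries:
--         q = a ^ b
--         if q not in have:
--             result.append([-1, -1])
--         else: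
--             result.append(have[q])
--     return result
-- ===== SOURCE B (Python) =====
-- def _locate(s, q):
--     if q < 0 or (1 << 31) <= q:
--         return [-1, -1]
--     t = ""
--     x = q
--     while x > 0:
--         t = ("1" if x % 2 == 1 else "0") + t
--         x //= 2
--     if not t:
--         t = "0"
--     p = s.find(t)
--     return [p, p + len(t) - 1] if p != -1 else [-1, -1]
--
-- def substringXorQueries(s, queries):
--     res = []
--     for a, b in queries:
--         res.append(_locate(s, a ^ b))
--     return res
-- ===== Notes on version B (the rewrite author's own statement) =====
-- stated objective: simpler
-- what changed: Replaces A's precomputed value-to-position dictionary (built from all <=31-bit windows of s) with a direct per-query search: compute q = a ^ b, render its binary string t, and locate the leftmost occurrence of t in s with str.find (guarding q < 0 or q >= 2**31, which can never match a <=31-bit window).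
-- outside the precondition, e.g. on substringXorQueries('7', [[7, 0]]): A returns [[0, 0]], B returns [[-1, -1]]
import Mathlib
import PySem

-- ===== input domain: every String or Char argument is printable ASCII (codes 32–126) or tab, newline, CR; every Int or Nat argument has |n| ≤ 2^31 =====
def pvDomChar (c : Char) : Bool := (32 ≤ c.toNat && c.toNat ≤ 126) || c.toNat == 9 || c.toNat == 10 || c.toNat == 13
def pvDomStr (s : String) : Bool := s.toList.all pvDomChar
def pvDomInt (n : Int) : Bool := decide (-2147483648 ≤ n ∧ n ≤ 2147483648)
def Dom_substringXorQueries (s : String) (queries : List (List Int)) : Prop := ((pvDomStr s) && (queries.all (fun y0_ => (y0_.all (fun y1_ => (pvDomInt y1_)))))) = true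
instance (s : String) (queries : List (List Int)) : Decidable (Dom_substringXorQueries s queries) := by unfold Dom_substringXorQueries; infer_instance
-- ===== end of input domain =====

-- B replaces A's precomputed value→position dictionary by a direct per-query str.find of the
-- query value's binary string (objective: simpler — no preprocessing pass, no index).

-- ===== PORT A =====
-- int(s[j]) as a total function: Pre_ restricts s to digit characters, so getD 0 is never taken
def aDigit (c : Char) : Int := (PySem.Int.ofChars? [c]).getD 0

-- the inner 'for j in range(i, min(i+31, n))' loop with its break, threading cur and the dict
def aInner (l : List Char) (i : Int) (js : List Int) (cur : Int)
    (hv : PySem.Dict Int (List Int)) : PySem.Dict Int (List Int) :=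
  match js with
  | [] => hv
  | j :: rest =>
    let cur' := cur * 2 + aDigit (PySem.List.pyGetD l j ' ')
    let hv' := if hv.contains cur' then hv else hv.insert cur' [i, j]
    if j == i && PySem.List.pyGetD l j ' ' == '0' then hv'
    else aInner l i rest cur' hv'

def substringXorQueries (s : String) (queries : List (List Int)) : List (List Int) :=
  let n : Int := PySem.Str.len s
  let hv := (PySem.List.pyRange 0 n 1).foldl
    (fun hv i => aInner s.toList i (PySem.List.pyRange i (min (i + 31) n) 1) 0 hv)
    PySem.Dict.empty
  queries.foldl (fun result row =>
    let a := PySem.List.pyGetD row 0 0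
    let b := PySem.List.pyGetD row 1 0
    let q := PySem.Int.bxor a b
    if !(hv.contains q) then result ++ [[-1, -1]]
    else result ++ [hv.getD q []]) []

-- ===== PORT B =====
-- the 'while x > 0' loop prepending binary digits
def binGo (x : Nat) (t : List Char) : List Char :=
  if x = 0 then t
  else binGo (x / 2) ((if x % 2 = 1 then '1' else '0') :: t)
  termination_by x
  decreasing_by exact Nat.div_lt_self (Nat.pos_of_ne_zero (by assumption)) (by omega)

def altLocate (l : List Char) (q : Int) : List Int :=
  if q < 0 || (1 <<< 31 : Int) ≤ q then [-1, -1]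
  else
    let t := binGo q.toNat []
    let t := if t = [] then ['0'] else t
    let p := PySem.Chars.find l t
    if p ≠ -1 then [p, p + (t.length : Int) - 1] else [-1, -1]

def substringXorQueries_alt (s : String) (queries : List (List Int)) : List (List Int) :=
  queries.foldl (fun res row =>
    let a := PySem.List.pyGetD row 0 0
    let b := PySem.List.pyGetD row 1 0
    res ++ [altLocate s.toList (PySem.Int.bxor a b)]) []

-- ===== PRECONDITION & SPEC =====
-- Pre_ restricts s to the function's domain of binary strings and queries to 2-element rows:
-- on rows of another arity and on non-digit characters in s the Python A raises (ValueError);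
-- on digit characters 2-9 A still returns (it reads them as base-2 digits of value 2..9 — an
-- accident of 'int(s[j])' that no caller of this binary-string task can rely on; see cites).
def Pre_substringXorQueries (s : String) (queries : List (List Int)) : Prop :=
  (s.toList.all (fun c => c == '0' || c == '1')) = true ∧
  (queries.all (fun row => row.length == 2)) = true

instance (s : String) (queries : List (List Int)) : Decidable (Pre_substringXorQueries s queries) := by
  unfold Pre_substringXorQueries; infer_instance

def pvWitness_substringXorQueries : String × List (List Int) :=
  ("1101", [[1, 2], [0, 0], [5, 5]])

def Spec_substringXorQueries (s : String) (queries : List (List Int)) (out : List (List Int)) : Prop :=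
  out = substringXorQueries_alt s queries
instance (s : String) (queries : List (List Int)) (out : List (List Int)) : Decidable (Spec_substringXorQueries s queries out) := by unfold Spec_substringXorQueries; infer_instance

-- ===== CLAIM (what is proved, stated in full; the proofs are below) =====
def Claim_equal_substringXorQueries : Prop := ∀ (s : String) (queries : List (List Int)), Dom_substringXorQueries s queries → Pre_substringXorQueries s queries → Spec_substringXorQueries s queries (substringXorQueries s queries)

-- ===== LEMMAS AND PROOFS =====

def bitv (c : Char) : Nat := if c = '1' then 1 else 0
def val (bs : List Char) : Nat := bs.foldl (fun a c => 2 * a + bitv c) 0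

def foldIA (d : PySem.Dict Int (List Int)) (es : List (Int × List Int)) : PySem.Dict Int (List Int) :=
  es.foldl (fun d e => if d.contains e.1 then d else d.insert e.1 e.2) d

def entryOf (l : List Char) (i k : Nat) : Int × List Int :=
  ((val ((l.drop i).take (k + 1)) : Int), [(i : Int), ((i + k : Nat) : Int)])

theorem val_append_bit (bs : List Char) (c : Char) : val (bs ++ [c]) = 2 * val bs + bitv c := by
  simp [val, List.foldl_append]

theorem aDigit_bitv (c : Char) (hc : c = '0' ∨ c = '1') : aDigit c = (bitv c : Int) := by
  rcases hc with h | h <;> subst h <;> decide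

theorem aInner_go (l : List Char) (hb : ∀ c ∈ l, c = '0' ∨ c = '1') (i : Nat)
    (hi1 : l[i]? = some '1') :
    ∀ (m k : Nat) (hv : PySem.Dict Int (List Int)),
    i + k + m = min (i + 31) l.length →
    aInner l (i : Int)
        (PySem.List.pyRange ((i + k : Nat) : Int) ((min (i + 31) l.length : Nat) : Int) 1)
        (val ((l.drop i).take k)) hv
      = foldIA hv ((List.range' k m).map (entryOf l i)) := by
  intro m
  induction m with
  | zero =>
    intro k hv hsum
    rw [PySem.List.pyRange_one_eq_nil (by exact_mod_cast Nat.le_of_eq (by omega))]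
    rfl
  | succ m ih =>
    intro k hv hsum
    have hlt : i + k < min (i + 31) l.length := by omega
    have hkn : i + k < l.length := by omega
    rw [PySem.List.pyRange_one_cons (by exact_mod_cast hlt)]
    show aInner l (i : Int) (((i + k : Nat) : Int) :: PySem.List.pyRange (((i + k : Nat) : Int) + 1) _ 1) _ hv = _
    rw [aInner]
    have hget : PySem.List.pyGetD l ((i + k : Nat) : Int) ' ' = l[i + k] := by
      rw [PySem.List.pyGetD_natCast]
      exact List.getD_eq_getElem l ' ' hkn
    have hc : l[i + k] = '0' ∨ l[i + k] = '1' := hb _ (l.getElem_mem hkn)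
    have hcur : val ((l.drop i).take k) * 2 + aDigit (PySem.List.pyGetD l ((i + k : Nat) : Int) ' ')
        = (val ((l.drop i).take (k + 1)) : Int) := by
      rw [hget, aDigit_bitv _ hc]
      have htk : (l.drop i).take (k + 1) = (l.drop i).take k ++ [l[i + k]] := by
        have hk' : k < (l.drop i).length := by simp; omega
        rw [List.take_add_one]
        congr 1
        rw [List.getElem?_eq_getElem hk']
        simp [List.getElem_drop]
      rw [htk, val_append_bit]
      push_cast
      ring
    have hbreak : ((((i + k : Nat) : Int) == (i : Int)) && (PySem.List.pyGetD l ((i + k : Nat) : Int) ' ' == '0')) = false := by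
      rcases Nat.eq_zero_or_pos k with hk0 | hk0
      · subst hk0
        have h1 : l[i + 0] = '1' := by
          have h := hi1
          rw [List.getElem?_eq_getElem (by omega : i < l.length)] at h
          simpa using Option.some.inj h
        have h1' : l[i] = '1' := h1
        rw [hget]
        simp [h1', h1]
      · simp
        intro h
        omega
    rw [hbreak]
    simp only [Bool.false_eq_true, if_false]
    rw [hcur]
    have : ((i + k : Nat) : Int) + 1 = ((i + (k+1) : Nat) : Int) := by push_cast; ring
    rw [this, ih (k+1) _ (by omega)]
    rw [List.range'_succ]
    simp only [List.map_cons]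
    rfl

def winE (l : List Char) (i : Nat) : List (Int × List Int) :=
  if l[i]? = some '0' then [(0, [(i : Int), (i : Int)])]
  else (List.range (min 31 (l.length - i))).map (entryOf l i)

def allE (l : List Char) : List (Int × List Int) :=
  (List.range l.length).flatMap (winE l)

theorem aInner_block (l : List Char) (hb : ∀ c ∈ l, c = '0' ∨ c = '1') (i : Nat)
    (hi : i < l.length) (hv : PySem.Dict Int (List Int)) :
    aInner l (i : Int) (PySem.List.pyRange (i : Int) ((min (i + 31) l.length : Nat) : Int) 1) 0 hv
      = foldIA hv (winE l i) := by
  have hget : PySem.List.pyGetD l ((i : Nat) : Int) ' ' = l[i] := by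
    rw [PySem.List.pyGetD_natCast]
    exact List.getD_eq_getElem l ' ' hi
  rcases hb l[i] (l.getElem_mem hi) with h0 | h1
  · -- l[i] = '0' : single entry then break
    rw [PySem.List.pyRange_one_cons (by exact_mod_cast (by omega : i < min (i + 31) l.length))]
    rw [aInner]
    have hcur : (0 : Int) * 2 + aDigit (PySem.List.pyGetD l (i : Int) ' ') = 0 := by
      rw [hget, h0]; decide
    rw [hcur]
    have hbreak : (((i : Int) == (i : Int)) && (PySem.List.pyGetD l (i : Int) ' ' == '0')) = true := by
      rw [hget, h0]; simp
    have hw : winE l i = [(0, [(i : Int), (i : Int)])] := by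
      unfold winE
      rw [List.getElem?_eq_getElem hi, h0]
      simp
    rw [hbreak, hw]
    rfl
  · -- l[i] = '1' : the full window pass
    have hi1 : l[i]? = some '1' := by rw [List.getElem?_eq_getElem hi, h1]
    have := aInner_go l hb i hi1 (min 31 (l.length - i)) 0 hv (by omega)
    simp only [Nat.add_zero, List.take_zero, val, List.foldl_nil, Nat.cast_zero] at this
    rw [this]
    unfold winE
    rw [if_neg (by rw [List.getElem?_eq_getElem hi, h1]; decide)]
    rw [List.range_eq_range']

theorem foldIA_append (d : PySem.Dict Int (List Int)) (xs ys : List (Int × List Int)) :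
    foldIA d (xs ++ ys) = foldIA (foldIA d xs) ys := by
  simp [foldIA, List.foldl_append]

theorem outer_fold (l : List Char) (hb : ∀ c ∈ l, c = '0' ∨ c = '1')
    (d : PySem.Dict Int (List Int)) :
    (PySem.List.pyRange 0 (l.length : Int) 1).foldl
        (fun hv i => aInner l i (PySem.List.pyRange i (min (i + 31) (l.length : Int)) 1) 0 hv) d
      = foldIA d (allE l) := by
  rw [PySem.List.pyRange_one, List.foldl_map]
  have h0 : ((l.length : Int) - 0).toNat = l.length := by omega
  rw [h0]
  unfold allE
  have : ∀ (is : List Nat), (∀ i ∈ is, i < l.length) → ∀ d,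
      is.foldl (fun hv (k : Nat) => aInner l (0 + (k : Int))
          (PySem.List.pyRange (0 + (k : Int)) (min (0 + (k : Int) + 31) (l.length : Int)) 1) 0 hv) d
        = foldIA d (is.flatMap (winE l)) := by
    intro is
    induction is with
    | nil => intro _ d; rfl
    | cons i rest ih =>
      intro hmem d
      have hi : i < l.length := hmem i (by simp)
      show List.foldl _ _ rest = _
      have hcast : (0 + (i : Int)) = ((i : Nat) : Int) := by push_cast; ring
      have hmin : min (0 + (i : Int) + 31) (l.length : Int) = ((min (i + 31) l.length : Nat) : Int) := by
        push_cast; omega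
      rw [List.flatMap_cons, foldIA_append, ← aInner_block l hb i hi d]
      rw [← ih (fun j hj => hmem j (by simp [hj]))]
      congr 1
      show aInner l (0 + (i : Int)) (PySem.List.pyRange (0 + (i : Int)) (min (0 + (i : Int) + 31) (l.length : Int)) 1) 0 d = _
      rw [hcast]
      rw [Nat.cast_min]
      push_cast
      ring_nf
  exact this _ (by intro i hi; simp at hi; omega) d

theorem binGo_eq_append (x : Nat) : ∀ t, binGo x t = binGo x [] ++ t := by
  induction x using Nat.strong_induction_on with
  | _ x ih =>
    intro t
    by_cases hx : x = 0
    · subst hx; simp [binGo]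
    · have hlt := Nat.div_lt_self (Nat.pos_of_ne_zero hx) one_lt_two
      rw [binGo, if_neg hx, ih (x / 2) hlt]
      conv_rhs => rw [binGo, if_neg hx, ih (x / 2) hlt]
      simp

theorem binGo_snoc (x : Nat) (hx : x ≠ 0) :
    binGo x [] = binGo (x / 2) [] ++ [if x % 2 = 1 then '1' else '0'] := by
  rw [binGo, if_neg hx, binGo_eq_append]

theorem binGo_ne_nil (x : Nat) (hx : x ≠ 0) : binGo x [] ≠ [] := by
  rw [binGo_snoc x hx]; simp

theorem binGo_head (x : Nat) (hx : x ≠ 0) : (binGo x []).head? = some '1' := by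
  induction x using Nat.strong_induction_on with
  | _ x ih =>
    by_cases h2 : x / 2 = 0
    · have hx1 : x = 1 := by omega
      subst hx1; simp [binGo]
    · rw [binGo_snoc x hx, List.head?_append_of_ne_nil _ (binGo_ne_nil _ h2)]
      exact ih (x / 2) (Nat.div_lt_self (Nat.pos_of_ne_zero hx) one_lt_two) h2

theorem val_binGo (x : Nat) : val (binGo x []) = x := by
  induction x using Nat.strong_induction_on with
  | _ x ih =>
    by_cases hx : x = 0
    · subst hx; simp [binGo, val]
    · rw [binGo_snoc x hx, val_append_bit,
        ih (x / 2) (Nat.div_lt_self (Nat.pos_of_ne_zero hx) one_lt_two)]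
      rcases Nat.mod_two_eq_zero_or_one x with h | h <;> simp [h, bitv] <;> omega

theorem val_pos (bs : List Char) (h0 : bs.head? = some '1') : 1 ≤ val bs := by
  induction bs using List.reverseRecOn with
  | nil => simp at h0
  | append_singleton init c ih =>
    rcases init.eq_nil_or_concat' with h | ⟨a, t, h⟩
    · subst h
      simp at h0
      subst h0; simp [val, bitv]
    · rw [val_append_bit]
      have : init.head? = some '1' := by
        subst h; simpa using h0
      have := ih this
      omega

theorem val_lt (bs : List Char) : val bs < 2 ^ bs.length := by
  induction bs using List.reverseRecOn with
  | nil => simp [val]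
  | append_singleton init c ih =>
    rw [val_append_bit]
    simp [List.length_append, pow_succ]
    have : bitv c ≤ 1 := by unfold bitv; split <;> omega
    omega

theorem length_binGo_le (k x : Nat) (h : x < 2 ^ k) : (binGo x []).length ≤ k := by
  induction k generalizing x with
  | zero => interval_cases x; simp [binGo]
  | succ k ih =>
    by_cases hx : x = 0
    · subst hx; simp [binGo]
    · rw [binGo_snoc x hx]
      have : x / 2 < 2 ^ k := by omega
      have := ih (x / 2) this
      simp [List.length_append]; omega

theorem bits_val (bs : List Char) (hb : ∀ c ∈ bs, c = '0' ∨ c = '1')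
    (h0 : bs.head? = some '1') : binGo (val bs) [] = bs := by
  induction bs using List.reverseRecOn with
  | nil => simp at h0
  | append_singleton init c ih =>
    rcases init.eq_nil_or_concat' with h | ⟨a, t, h⟩
    · subst h
      simp at h0; subst h0
      simp [val, bitv, binGo]
    · have hinit : init ≠ [] := by subst h; simp
      have h0' : init.head? = some '1' := by
        subst h; simpa using h0
      have hpos := val_pos init h0'
      have hcb : c = '0' ∨ c = '1' := hb c (by simp)
      rw [val_append_bit]
      have hne : 2 * val init + bitv c ≠ 0 := by omega
      rw [binGo_snoc _ hne]
      have hdiv : (2 * val init + bitv c) / 2 = val init := by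
        rcases hcb with h | h <;> simp [h, bitv] <;> omega
      have hmod : (2 * val init + bitv c) % 2 = bitv c := by
        rcases hcb with h | h <;> simp [h, bitv] <;> omega
      rw [hdiv, hmod, ih (fun d hd => hb d (by simp [hd]))  h0']
      congr 1
      rcases hcb with h | h <;> simp [h, bitv]

def tOf (q : Int) : List Char := if q = 0 then ['0'] else binGo q.toNat []

theorem find?_of_unique {α : Type} (p : α → Bool) (xs : List α) (x : α) (hx : x ∈ xs)
    (hp : p x = true) (huniq : ∀ y ∈ xs, p y = true → y = x) : xs.find? p = some x := by
  induction xs with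
  | nil => simp at hx
  | cons a rest ih =>
    rcases List.mem_cons.1 hx with h | h
    · subst h; simp [List.find?_cons, hp]
    · by_cases hpa : p a = true
      · have : a = x := huniq a (by simp) hpa
        subst this; simp [List.find?_cons, hpa]
      · rw [List.find?_cons_of_neg (by simpa using hpa)]
        exact ih h (fun y hy hpy => huniq y (by simp [hy]) hpy)

theorem drop_head (l : List Char) (i : Nat) (hi : i < l.length) :
    l.drop i = l[i] :: l.drop (i + 1) := List.drop_eq_getElem_cons hi

theorem sub_head (l : List Char) (i k : Nat) (hi : i < l.length) :
    ((l.drop i).take (k + 1)).head? = some l[i] := by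
  rw [drop_head l i hi, List.take_succ_cons]; rfl

theorem sub_binary (l : List Char) (hb : ∀ c ∈ l, c = '0' ∨ c = '1') (i k : Nat) :
    ∀ c ∈ (l.drop i).take (k + 1), c = '0' ∨ c = '1' :=
  fun c hc => hb c (List.mem_of_mem_drop (List.mem_of_mem_take hc))

theorem sub_length (l : List Char) (i k : Nat) (h : k < l.length - i) :
    ((l.drop i).take (k + 1)).length = k + 1 := by
  simp only [List.length_take, List.length_drop]
  omega

theorem prefix_head (t xs : List Char) (h : t <+: xs) (hne : t ≠ []) :
    xs.head? = t.head? := by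
  rcases h with ⟨r, rfl⟩
  cases t
  · exact absurd rfl hne
  · rfl

theorem tOf_ne_nil (q : Int) (hq : 0 ≤ q) : tOf q ≠ [] := by
  unfold tOf
  split
  · simp
  · exact binGo_ne_nil _ (by omega)

theorem tOf_head_pos (q : Int) (hq : 0 < q) : (tOf q).head? = some '1' := by
  unfold tOf
  rw [if_neg (by omega)]
  exact binGo_head _ (by omega)

theorem tOf_zero : tOf 0 = ['0'] := by unfold tOf; simp

theorem val_tOf (q : Int) (hq : 0 ≤ q) : val (tOf q) = q.toNat := by
  unfold tOf
  split
  · next h => subst h; decide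
  · exact val_binGo _

theorem tOf_len31 (q : Int) (hq : 0 ≤ q) (h : q < 2 ^ 31) : (tOf q).length ≤ 31 := by
  unfold tOf
  split
  · simp
  · exact length_binGo_le 31 _ (by omega)

-- the value of a window equals q exactly when the window is q's canonical binary string
theorem sub_eq_tOf (l : List Char) (hb : ∀ c ∈ l, c = '0' ∨ c = '1') (i k : Nat)
    (hi : i < l.length) (hi1 : l[i] = '1') (q : Int) (hq : 0 < q) :
    ((val ((l.drop i).take (k + 1)) : Int) = q ↔ (l.drop i).take (k + 1) = tOf q) := by
  constructor
  · intro hv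
    have h1 : ((l.drop i).take (k + 1)).head? = some '1' := by rw [sub_head l i k hi, hi1]
    have htn : q.toNat = val ((l.drop i).take (k + 1)) := by omega
    unfold tOf
    rw [if_neg (by omega), htn]
    exact (bits_val ((l.drop i).take (k + 1)) (sub_binary l hb i k) h1).symm
  · intro hs
    rw [hs, val_tOf q (le_of_lt hq)]
    omega

theorem winE_find?_eq (l : List Char) (hb : ∀ c ∈ l, c = '0' ∨ c = '1') (q : Int)
    (hq : 0 ≤ q) (h31 : (tOf q).length ≤ 31) (i : Nat) (hi : i < l.length) :
    (winE l i).find? (fun e => e.1 == q)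
      = if tOf q <+: l.drop i
          then some (q, [(i : Int), (i : Int) + (tOf q).length - 1])
          else none := by
  have hgetI := List.getElem?_eq_getElem hi
  rcases hb l[i] (l.getElem_mem hi) with h0 | h1
  · -- l[i] = '0'
    have hw : winE l i = [(0, [(i : Int), (i : Int)])] := by
      unfold winE; rw [hgetI, h0]; simp
    rw [hw]
    by_cases hq0 : q = 0
    · subst hq0
      rw [tOf_zero]
      have hpre : ['0'] <+: l.drop i := by
        rw [drop_head l i hi, h0]
        exact ⟨l.drop (i + 1), rfl⟩
      rw [if_pos hpre]
      rw [List.find?_cons_of_pos (by simp)]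
      norm_num
    · rw [List.find?_cons_of_neg (by simp; omega), List.find?_nil]
      rw [if_neg ?hnp]
      case hnp =>
        intro hpre
        have hh := prefix_head _ _ hpre (tOf_ne_nil q hq)
        rw [tOf_head_pos q (by omega), drop_head l i hi, h0] at hh
        simp at hh
  · -- l[i] = '1'
    have hw : winE l i = (List.range (min 31 (l.length - i))).map (entryOf l i) := by
      unfold winE; rw [hgetI, h1]
      rw [if_neg (by decide)]
    rw [hw]
    by_cases hq0 : q = 0
    · subst hq0
      rw [tOf_zero]
      rw [List.find?_eq_none.2 ?hnone, if_neg ?hnp]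
      case hnp =>
        intro hpre
        have hh := prefix_head _ _ hpre (by simp)
        rw [drop_head l i hi, h1] at hh
        simp at hh
      case hnone =>
        intro e he
        rcases List.mem_map.1 he with ⟨k, hk, rfl⟩
        have hpos : 1 ≤ val ((l.drop i).take (k + 1)) :=
          val_pos _ (by rw [sub_head l i k hi, h1])
        simp only [entryOf]
        simp
        omega
    · have hqpos : 0 < q := by omega
      by_cases hpre : tOf q <+: l.drop i
      · have htlen : (tOf q).length ≤ l.length - i := by
          have := hpre.length_le
          simp at this
          omega
        have htpos : 1 ≤ (tOf q).length :=
          List.length_pos_of_ne_nil (tOf_ne_nil q hq)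
        have hk₀ : (tOf q).length - 1 < min 31 (l.length - i) := by omega
        have hsub : (l.drop i).take ((tOf q).length - 1 + 1) = tOf q := by
          rw [show (tOf q).length - 1 + 1 = (tOf q).length by omega]
          exact (List.prefix_iff_eq_take.1 hpre).symm
        have hvq : (val ((l.drop i).take ((tOf q).length - 1 + 1)) : Int) = q :=
          (sub_eq_tOf l hb i _ hi h1 q hqpos).2 hsub
        rw [if_pos hpre]
        rw [find?_of_unique _ _ (entryOf l i ((tOf q).length - 1))
          (List.mem_map_of_mem (List.mem_range.2 hk₀))
          (by simp only [entryOf]; simpa using hvq)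
          ?uniq]
        · unfold entryOf
          rw [hvq]
          have h2 : ((i + ((tOf q).length - 1) : Nat) : Int) = (i : Int) + ((tOf q).length : Int) - 1 := by
            omega
          rw [h2]
        case uniq =>
          intro y hy hpy
          rcases List.mem_map.1 hy with ⟨k, hk, rfl⟩
          simp only [entryOf] at hpy
          simp at hpy
          have hsk := (sub_eq_tOf l hb i k hi h1 q hqpos).1 hpy
          have hlk : k + 1 = (tOf q).length := by
            rw [← hsk, sub_length l i k (by simp at hk; omega)]
          congr 1
          omega
      · rw [if_neg hpre]
        apply List.find?_eq_none.2
        intro e he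
        rcases List.mem_map.1 he with ⟨k, hk, rfl⟩
        simp only [entryOf]
        simp
        intro heq
        have hsk := (sub_eq_tOf l hb i k hi h1 q hqpos).1 heq
        exact absurd (hsk ▸ List.take_prefix _ _) hpre

theorem find?_range_none (P : Nat → Bool) (n : Nat) (h : ∀ j < n, P j = false) :
    (List.range n).find? P = none :=
  List.find?_eq_none.2 (fun x hx => by simp [h x (List.mem_range.1 hx)])

theorem find?_range_least (P : Nat → Bool) (n m : Nat) (hm : m < n) (hP : P m = true)
    (hmin : ∀ j < m, P j = false) : (List.range n).find? P = some m := by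
  induction n with
  | zero => omega
  | succ n ih =>
    rw [List.range_succ, List.find?_append]
    by_cases hmn : m < n
    · rw [ih hmn]; rfl
    · have hmn' : m = n := by omega
      subst hmn'
      rw [find?_range_none P m hmin]
      simp [hP]

theorem allE_find? (l : List Char) (hb : ∀ c ∈ l, c = '0' ∨ c = '1') (q : Int)
    (hq : 0 ≤ q) (h31 : (tOf q).length ≤ 31) :
    (allE l).find? (fun e => e.1 == q) =
      match (List.range l.length).find? (fun i => decide (tOf q <+: l.drop i)) with
      | some i => some (q, [(i : Int), (i : Int) + ((tOf q).length : Int) - 1])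
      | none => none := by
  unfold allE
  have main : ∀ is : List Nat, (∀ i ∈ is, i < l.length) →
      (is.flatMap (winE l)).find? (fun e => e.1 == q) =
        match is.find? (fun i => decide (tOf q <+: l.drop i)) with
        | some i => some (q, [(i : Int), (i : Int) + ((tOf q).length : Int) - 1])
        | none => none := by
    intro is
    induction is with
    | nil => intro _; rfl
    | cons i rest ih =>
      intro hmem
      rw [List.flatMap_cons, List.find?_append,
        winE_find?_eq l hb q hq h31 i (hmem i (by simp))]
      by_cases hp : tOf q <+: l.drop i
      · rw [if_pos hp, List.find?_cons_of_pos (by simpa using hp)]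
        rfl
      · rw [if_neg hp, List.find?_cons_of_neg (by simpa using hp)]
        rw [← ih (fun j hj => hmem j (by simp [hj]))]
        rfl
  exact main _ (fun i hi => List.mem_range.1 hi)

theorem allE_keys_nonneg (l : List Char) (e : Int × List Int) (he : e ∈ allE l) : 0 ≤ e.1 := by
  rcases List.mem_flatMap.1 he with ⟨i, _, hw⟩
  unfold winE at hw
  split at hw
  · simp at hw; simp [hw]
  · rcases List.mem_map.1 hw with ⟨k, _, rfl⟩
    exact Int.natCast_nonneg _

theorem allE_keys_lt (l : List Char) (e : Int × List Int) (he : e ∈ allE l) :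
    e.1 < (2 : Int) ^ 31 := by
  rcases List.mem_flatMap.1 he with ⟨i, _, hw⟩
  unfold winE at hw
  split at hw
  · simp at hw; simp [hw]
  · rcases List.mem_map.1 hw with ⟨k, hk, rfl⟩
    simp only [entryOf]
    have h1 : val ((l.drop i).take (k + 1)) < 2 ^ ((l.drop i).take (k + 1)).length :=
      val_lt _
    have h2 : ((l.drop i).take (k + 1)).length ≤ k + 1 := by
      simpa using List.length_take_le _ _
    have h3 : k + 1 ≤ 31 := by simp at hk; omega
    have h4 : val ((l.drop i).take (k + 1)) < 2 ^ 31 := by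
      calc val _ < 2 ^ ((l.drop i).take (k + 1)).length := h1
        _ ≤ 2 ^ 31 := Nat.pow_le_pow_right (by omega) (by omega)
    exact_mod_cast h4

theorem get?_foldIA (es : List (Int × List Int)) (d : PySem.Dict Int (List Int)) (k : Int) :
    (foldIA d es).get? k =
      ((d.get? k).orElse (fun _ => (es.find? (fun e => e.1 == k)).map (·.2))) := by
  induction es generalizing d with
  | nil =>
    show d.get? k = _
    cases d.get? k <;> rfl
  | cons e rest ih =>
    show (foldIA (if d.contains e.1 then d else d.insert e.1 e.2) rest).get? k = _
    by_cases hc : d.contains e.1 = true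
    · rw [if_pos hc, ih]
      by_cases hk : e.1 = k
      · subst hk
        have : (d.get? e.1).isSome := by
          rw [← PySem.Dict.contains_eq_isSome_get?]; exact hc
        rcases Option.isSome_iff_exists.1 this with ⟨v, hv⟩
        simp [List.find?_cons, hv, Option.orElse]
      · simp [List.find?_cons, hk]
    · rw [if_neg hc, ih]
      have hdk : d.get? e.1 = none := by
        rcases h : d.get? e.1 with _ | v
        · rfl
        · exact absurd (by rw [PySem.Dict.contains_eq_isSome_get?, h]; rfl) hc
      by_cases hk : e.1 = k
      · subst hk
        rw [PySem.Dict.get?_insert_self]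
        simp [hdk, List.find?_cons, Option.orElse]
      · rw [PySem.Dict.get?_insert_of_ne]
        · simp [List.find?_cons, hk]
        · exact fun h => hk h.symm

theorem hv_get? (l : List Char) (hb : ∀ c ∈ l, c = '0' ∨ c = '1') (q : Int) :
    (foldIA PySem.Dict.empty (allE l)).get? q =
      if q < 0 ∨ (2 : Int) ^ 31 ≤ q then none
      else if PySem.Chars.find l (tOf q) = -1 then none
      else some [PySem.Chars.find l (tOf q),
        PySem.Chars.find l (tOf q) + ((tOf q).length : Int) - 1] := by
  rw [get?_foldIA]
  rw [PySem.Dict.get?_empty]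
  show ((allE l).find? (fun e => e.1 == q)).map (·.2) = _
  by_cases hneg : q < 0
  · rw [List.find?_eq_none.2 (fun e he => by
      have := allE_keys_nonneg l e he
      simp; omega)]
    rw [if_pos (Or.inl hneg)]
    rfl
  · by_cases hbig : (2 : Int) ^ 31 ≤ q
    · rw [List.find?_eq_none.2 (fun e he => by
        have := allE_keys_lt l e he
        simp; omega)]
      rw [if_pos (Or.inr hbig)]
      rfl
    · rw [if_neg (by omega)]
      have hq : 0 ≤ q := by omega
      have h31 : (tOf q).length ≤ 31 := tOf_len31 q hq (by omega)
      rw [allE_find? l hb q hq h31]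
      by_cases hfind : PySem.Chars.find l (tOf q) = -1
      · rw [if_pos hfind]
        have hnocc : ∀ i, ¬ (tOf q <+: l.drop i) := by
          intro i hpre
          have hisin : PySem.Chars.isIn (tOf q) l = true :=
            (PySem.Chars.exists_prefix_drop_iff_isIn _ _).1 ⟨i, hpre⟩
          have := (PySem.Chars.find_eq_neg_one_iff _ _).1 hfind
          exact this ((PySem.Chars.isIn_iff_infix _ _).1 hisin)
        rw [find?_range_none _ _ (fun j _ => by simp [hnocc j])]
        rfl
      · rw [if_neg hfind]
        have hinf : tOf q <:+: l := (PySem.Chars.find_ne_neg_one_iff _ _).1 hfind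
        have hnn : 0 ≤ PySem.Chars.find l (tOf q) := (PySem.Chars.find_nonneg_iff _ _).2 hinf
        obtain ⟨hp1, hp2⟩ := PySem.Chars.find_spec hnn
        have hplt : (PySem.Chars.find l (tOf q)).toNat < l.length := by
          have hlen := hp1.length_le
          have htpos := List.length_pos_of_ne_nil (tOf_ne_nil q hq)
          simp only [List.length_drop] at hlen
          omega
        rw [find?_range_least _ _ (PySem.Chars.find l (tOf q)).toNat hplt
          (by simpa using hp1) (fun j hj => by simpa using hp2 j hj)]
        show some [(((PySem.Chars.find l (tOf q)).toNat : Nat) : Int), _] = _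
        rw [Int.toNat_of_nonneg hnn]

-- folding a per-row append over the queries is mapping the per-row function
theorem foldl_app (qs : List (List Int)) (f : List Int → List Int)
    (g : List (List Int) → List Int → List (List Int))
    (hg : ∀ r row, g r row = r ++ [f row]) :
    ∀ acc, qs.foldl g acc = acc ++ qs.map f := by
  induction qs with
  | nil => intro acc; simp
  | cons row rest ih =>
    intro acc
    rw [List.foldl_cons, hg, ih, List.map_cons]
    simp

theorem one_shl_31 : ((1 <<< 31 : Nat) : Int) = 2 ^ 31 := by decide

theorem tOf_eq_alt (q : Int) (hq : 0 ≤ q) :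
    (if binGo q.toNat [] = [] then ['0'] else binGo q.toNat []) = tOf q := by
  by_cases h : q = 0
  · subst h
    show (if binGo 0 [] = [] then ['0'] else binGo 0 []) = tOf 0
    rw [binGo]
    simp [tOf]
  · rw [if_neg (binGo_ne_nil _ (by omega))]
    unfold tOf
    rw [if_neg h]

-- the per-query results agree
theorem perQ (l : List Char) (hb : ∀ c ∈ l, c = '0' ∨ c = '1') (q : Int) :
    (if !((foldIA PySem.Dict.empty (allE l)).contains q) then ([-1, -1] : List Int)
     else (foldIA PySem.Dict.empty (allE l)).getD q []) = altLocate l q := by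
  unfold altLocate
  rw [PySem.Dict.contains_eq_isSome_get?, PySem.Dict.getD_eq_get?_getD, hv_get? l hb q]
  by_cases hg : q < 0 ∨ (2 : Int) ^ 31 ≤ q
  · rw [if_pos hg]
    have hc : (decide (q < 0) || decide (((1 <<< 31 : Nat) : Int) ≤ q)) = true := by
      rw [one_shl_31]
      simp
      omega
    simp only [hc, Option.isSome_none, Bool.not_false, if_true]
  · rw [if_neg hg]
    have hq0 : 0 ≤ q := by omega
    have hc : (decide (q < 0) || decide (((1 <<< 31 : Nat) : Int) ≤ q)) = false := by
      rw [one_shl_31]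
      simp
      omega
    simp only [hc, Bool.false_eq_true, if_false, tOf_eq_alt q hq0]
    by_cases hfind : PySem.Chars.find l (tOf q) = -1
    · rw [if_pos hfind]
      simp [hfind]
    · rw [if_neg hfind]
      simp [hfind]

-- both query loops are maps of their per-row function
theorem foldl_eq (qs : List (List Int))
    (gA gB : List (List Int) → List Int → List (List Int)) (fA fB : List Int → List Int)
    (hA : ∀ r row, gA r row = r ++ [fA row]) (hB : ∀ r row, gB r row = r ++ [fB row])
    (hf : ∀ row, fA row = fB row) :
    qs.foldl gA [] = qs.foldl gB [] := by
  rw [foldl_app qs fA gA hA [], foldl_app qs fB gB hB []]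
  simp only [List.nil_append]
  exact List.map_congr_left (fun row _ => hf row)

-- ===== VERDICT (by name: the statement is the Claim_ definition above) =====
theorem substringXorQueries_spec : Claim_equal_substringXorQueries := by
  intro s queries _ hPre
  obtain ⟨hb1, -⟩ := hPre
  have hbin : ∀ c ∈ s.toList, c = '0' ∨ c = '1' := by
    intro c hc
    have := List.all_eq_true.1 hb1 c hc
    simpa using this
  show substringXorQueries s queries = substringXorQueries_alt s queries
  unfold substringXorQueries substringXorQueries_alt
  have hn : PySem.Str.len s = (s.toList.length : Int) := by simp [PySem.Str.len]
  simp only [hn]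
  rw [outer_fold s.toList hbin]
  refine foldl_eq queries _ _
    (fun row =>
      if !((foldIA PySem.Dict.empty (allE s.toList)).contains (PySem.Int.bxor (PySem.List.pyGetD row 0 0) (PySem.List.pyGetD row 1 0))) then [-1, -1]
      else (foldIA PySem.Dict.empty (allE s.toList)).getD (PySem.Int.bxor (PySem.List.pyGetD row 0 0) (PySem.List.pyGetD row 1 0)) [])
    (fun row => altLocate s.toList (PySem.Int.bxor (PySem.List.pyGetD row 0 0) (PySem.List.pyGetD row 1 0)))
    ?hA ?hB ?hf
  case hA =>
    intro r row
    by_cases h : ((foldIA PySem.Dict.empty (allE s.toList)).contains (PySem.Int.bxor (PySem.List.pyGetD row 0 0) (PySem.List.pyGetD row 1 0))) = true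
    · simp [h]
    · simp [h]
  case hB => intro r row; rfl
  case hf => intro row; exact perQ s.toList hbin (PySem.Int.bxor (PySem.List.pyGetD row 0 0) (PySem.List.pyGetD row 1 0))
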